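-- pv_equiv track=rewrite | github.com/Golfbot-Group18/GolfBot | src/Server/Utils/path_conversion.py | combine_small_steps
-- ===== SOURCE A (Python) =====
-- def combine_small_steps(vectors, tolerance=1):
--     if not vectors:
--         return []
--
--     simplified_vectors = []
--     current_dx, current_dy = vectors[0]
--     accumulated_dx, accumulated_dy = current_dx, current_dy
--
--     for i in range(1, len(vectors)):
--         dx, dy = vectors[i]
--
--         # Check if the direction is the same within the tolerance
--         if abs(dx - current_dx) <= tolerance and abs(dy - current_dy) <= tolerance:
--             accumulated_dx += dx
--             accumulated_dy += dy
--         else: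
--             simplified_vectors.append((accumulated_dx, accumulated_dy))
--             current_dx, current_dy = dx, dy
--             accumulated_dx, accumulated_dy = dx, dy
--
--     # Append the last accumulated vector
--     simplified_vectors.append((accumulated_dx, accumulated_dy))
--
--     return simplified_vectors
-- ===== SOURCE B (Python) =====
-- def combine_small_steps(vectors, tolerance=1):
--     # Pass 1: partition into runs anchored at each run's first vector.
--     runs = []
--     for v in vectors:
--         if runs and abs(v[0] - runs[-1][0][0]) <= tolerance and abs(v[1] - runs[-1][0][1]) <= tolerance:
--             runs[-1].append(v)
--         else:
--             runs.append([v])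
--     # Pass 2: map each run to its coordinate-wise sum.
--     return [(sum(dx for dx, _ in r), sum(dy for _, dy in r)) for r in runs]
-- ===== Notes on version B (the rewrite author's own statement) =====
-- stated objective: alternative
-- what changed: B separates the work into two passes: it first partitions the vectors into anchor-based runs as explicit lists, then maps each run to its coordinate-wise sum, instead of A's single loop threading current/accumulated/output state.
import Mathlib
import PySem

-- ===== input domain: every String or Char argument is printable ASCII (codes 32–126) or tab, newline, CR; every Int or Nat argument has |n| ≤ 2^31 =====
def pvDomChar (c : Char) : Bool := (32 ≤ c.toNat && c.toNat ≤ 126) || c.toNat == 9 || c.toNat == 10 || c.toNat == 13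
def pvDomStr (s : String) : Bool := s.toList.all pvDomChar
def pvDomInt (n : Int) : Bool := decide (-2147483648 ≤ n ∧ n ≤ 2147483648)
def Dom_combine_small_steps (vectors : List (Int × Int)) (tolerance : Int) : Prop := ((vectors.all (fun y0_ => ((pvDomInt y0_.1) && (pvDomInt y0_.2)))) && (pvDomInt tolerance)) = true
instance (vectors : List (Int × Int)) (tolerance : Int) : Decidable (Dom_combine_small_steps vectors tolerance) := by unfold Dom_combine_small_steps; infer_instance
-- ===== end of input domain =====

-- B re-decomposes A's single stateful loop into two passes (partition into anchor-based runs, then sum each run); same O(n) cost, return value proved equal.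

-- ===== PORT A =====
-- A's for-loop over vectors[1:], threading (simplified, current, accumulated).
def cssLoopA (rest : List (Int × Int)) (cur acc : Int × Int)
    (simplified : List (Int × Int)) (tolerance : Int) : List (Int × Int) :=
  match rest with
  | [] => simplified ++ [acc]
  | (dx, dy) :: rs =>
    if |dx - cur.1| ≤ tolerance ∧ |dy - cur.2| ≤ tolerance then
      cssLoopA rs cur (acc.1 + dx, acc.2 + dy) simplified tolerance
    else
      cssLoopA rs (dx, dy) (dx, dy) (simplified ++ [acc]) tolerance

def combine_small_steps (vectors : List (Int × Int)) (tolerance : Int) : List (Int × Int) :=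
  match vectors with
  | [] => []
  | v :: vs => cssLoopA vs v v [] tolerance

-- ===== PORT B =====
-- Pass 1: partition into runs, each anchored at its first element.
def cssRuns (rest : List (Int × Int)) (anchor : Int × Int)
    (run : List (Int × Int)) (tolerance : Int) : List (List (Int × Int)) :=
  match rest with
  | [] => [run]
  | v :: rs =>
    if |v.1 - anchor.1| ≤ tolerance ∧ |v.2 - anchor.2| ≤ tolerance then
      cssRuns rs anchor (run ++ [v]) tolerance
    else
      run :: cssRuns rs v [v] tolerance

-- Pass 2: coordinate-wise sum of a run.
def cssSum (r : List (Int × Int)) : Int × Int :=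
  ((r.map Prod.fst).sum, (r.map Prod.snd).sum)

def combine_small_steps_alt (vectors : List (Int × Int)) (tolerance : Int) : List (Int × Int) :=
  match vectors with
  | [] => []
  | v :: vs => (cssRuns vs v [v] tolerance).map cssSum

-- ===== PRECONDITION & SPEC =====
def Spec_combine_small_steps (vectors : List (Int × Int)) (tolerance : Int) (out : List (Int × Int)) : Prop := out = combine_small_steps_alt vectors tolerance
instance (vectors : List (Int × Int)) (tolerance : Int) (out : List (Int × Int)) : Decidable (Spec_combine_small_steps vectors tolerance out) := by unfold Spec_combine_small_steps; infer_instance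

-- ===== CLAIM (what is proved, stated in full; the proofs are below) =====
def Claim_equal_combine_small_steps : Prop := ∀ (vectors : List (Int × Int)) (tolerance : Int), Dom_combine_small_steps vectors tolerance → Spec_combine_small_steps vectors tolerance (combine_small_steps vectors tolerance)

-- ===== LEMMAS AND PROOFS =====

theorem cssSum_append (r : List (Int × Int)) (v : Int × Int) :
    cssSum (r ++ [v]) = ((cssSum r).1 + v.1, (cssSum r).2 + v.2) := by
  simp [cssSum]

-- Loop invariant: A's loop with accumulator cssSum run equals simplified ++ map cssSum over B's runs.
theorem cssLoopA_eq_runs (rest : List (Int × Int)) :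
    ∀ (cur : Int × Int) (run : List (Int × Int)) (simplified : List (Int × Int)) (tolerance : Int),
    cssLoopA rest cur (cssSum run) simplified tolerance
      = simplified ++ (cssRuns rest cur run tolerance).map cssSum := by
  induction rest with
  | nil => intro cur run simplified tolerance; simp [cssLoopA, cssRuns]
  | cons v rs ih =>
    intro cur run simplified tolerance
    obtain ⟨dx, dy⟩ := v
    by_cases h : |dx - cur.1| ≤ tolerance ∧ |dy - cur.2| ≤ tolerance
    · have : ((cssSum run).1 + dx, (cssSum run).2 + dy) = cssSum (run ++ [(dx, dy)]) := by
        simp [cssSum_append]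
      simp only [cssLoopA, cssRuns, if_pos h, this, ih]
    · have hv : (dx, dy) = cssSum [(dx, dy)] := by simp [cssSum]
      calc cssLoopA ((dx, dy) :: rs) cur (cssSum run) simplified tolerance
          = cssLoopA rs (dx, dy) (dx, dy) (simplified ++ [cssSum run]) tolerance := by
            simp [cssLoopA, if_neg h]
        _ = cssLoopA rs (dx, dy) (cssSum [(dx, dy)]) (simplified ++ [cssSum run]) tolerance := by
            rw [← hv]
        _ = (simplified ++ [cssSum run]) ++ (cssRuns rs (dx, dy) [(dx, dy)] tolerance).map cssSum := ih _ _ _ _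
        _ = simplified ++ (cssRuns ((dx, dy) :: rs) cur run tolerance).map cssSum := by
            simp [cssRuns, if_neg h]

-- ===== VERDICT (by name: the statement is the Claim_ definition above) =====
theorem combine_small_steps_spec : Claim_equal_combine_small_steps := by
  intro vectors tolerance _
  unfold Spec_combine_small_steps
  cases vectors with
  | nil => rfl
  | cons v vs =>
      have hv : v = cssSum [v] := by simp [cssSum]
      simp only [combine_small_steps, combine_small_steps_alt]
      calc cssLoopA vs v v [] tolerance
          = cssLoopA vs v (cssSum [v]) [] tolerance := by rw [← hv]
        _ = [] ++ (cssRuns vs v [v] tolerance).map cssSum := cssLoopA_eq_runs vs v [v] [] tolerance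
        _ = (cssRuns vs v [v] tolerance).map cssSum := by simp
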